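-- pv_equiv track=rewrite | github.com/adestefa/satori-tm-legal-system | tiger/app/core/legal_validators/legal_validators.py | _has_adverse_action
-- ===== SOURCE A (Python) =====
-- from typing import Dict, List, Any, Optional
--
-- def _has_adverse_action(complaint_data: Dict[str, Any]) -> bool:
--     """Check timeline for adverse action evidence"""
--     timeline = complaint_data.get('timeline', [])
--
--     adverse_keywords = [
--         'denied', 'denial', 'rejected', 'declined', 'adverse action',
--         'rate increase', 'higher rate', 'unfavorable terms',
--         'credit limit', 'reduced limit', 'closed account'
--     ]
--
--     for event in timeline:
--         event_text = event.get('event', '').lower()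
--
--         for keyword in adverse_keywords:
--             if keyword in event_text:
--                 return True
--
--     return False
-- ===== SOURCE B (Python) =====
-- ADVERSE_KEYWORDS = [
--     'denied', 'denial', 'rejected', 'declined', 'adverse action',
--     'rate increase', 'higher rate', 'unfavorable terms',
--     'credit limit', 'reduced limit', 'closed account'
-- ]
--
-- # Index the keywords once by their first character, so the scan only tests
-- # keywords that can possibly start at the current position.
-- _BY_FIRST = {}
-- for _kw in ADVERSE_KEYWORDS:
--     _BY_FIRST[_kw[0]] = _BY_FIRST.get(_kw[0], []) + [_kw]
--
-- def _has_adverse_action(complaint_data):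
--     """Check timeline for adverse action evidence"""
--     for event in complaint_data.get('timeline', []):
--         text = event.get('event', '').lower()
--         for i in range(len(text)):
--             for kw in _BY_FIRST.get(text[i], ()):
--                 if text.startswith(kw, i):
--                     return True
--     return False
-- ===== Notes on version B (the rewrite author's own statement) =====
-- stated objective: alternative
-- what changed: B precomputes a dict indexing the 11 keywords by first character and, per event, does one left-to-right position scan of the lowered text, testing startswith only for keywords whose first character matches text[i], instead of A's inner loop running a full substring search for every keyword.
import Mathlib
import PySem

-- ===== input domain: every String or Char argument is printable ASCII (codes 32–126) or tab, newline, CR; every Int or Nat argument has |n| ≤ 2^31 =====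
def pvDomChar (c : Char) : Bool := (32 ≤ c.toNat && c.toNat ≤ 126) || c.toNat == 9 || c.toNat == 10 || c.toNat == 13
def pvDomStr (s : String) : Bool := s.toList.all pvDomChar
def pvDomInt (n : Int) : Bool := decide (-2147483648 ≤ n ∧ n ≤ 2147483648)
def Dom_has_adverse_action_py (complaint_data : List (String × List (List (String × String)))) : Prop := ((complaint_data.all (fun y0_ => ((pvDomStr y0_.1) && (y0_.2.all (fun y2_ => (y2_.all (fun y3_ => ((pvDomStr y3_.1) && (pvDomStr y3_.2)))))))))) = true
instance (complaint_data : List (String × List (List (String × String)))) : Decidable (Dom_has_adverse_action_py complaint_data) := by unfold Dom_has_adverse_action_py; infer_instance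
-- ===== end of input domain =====

-- B replaces A's per-event "is any keyword a substring" scan by a single left-to-right
-- position scan per event using a first-character index of the keywords (alternative
-- decomposition, same asymptotic cost). Neither program mutates its argument.

-- ===== PORT A =====

def adverseKeywords : List String :=
  ["denied", "denial", "rejected", "declined", "adverse action",
   "rate increase", "higher rate", "unfavorable terms",
   "credit limit", "reduced limit", "closed account"]

-- 'for keyword in adverse_keywords: if keyword in event_text: return True'
def aKwLoop (event_text : String) : List String → Bool
  | [] => false
  | k :: ks => if PySem.Str.isIn k event_text then true else aKwLoop event_text ks

-- 'for event in timeline: …'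
def aEventLoop : List (List (String × String)) → Bool
  | [] => false
  | e :: es =>
    let event_text := PySem.Str.lower (PySem.Dict.getD (PySem.Dict.mk e) "event" "")
    if aKwLoop event_text adverseKeywords then true else aEventLoop es

def has_adverse_action_py (complaint_data : List (String × List (List (String × String)))) : Bool :=
  aEventLoop (PySem.Dict.getD (PySem.Dict.mk complaint_data) "timeline" [])

-- ===== PORT B =====

-- module-level build of _BY_FIRST: _BY_FIRST[kw[0]] = _BY_FIRST.get(kw[0], []) + [kw]
-- (kw[0] on the nonempty keyword literals is ported as kw.toList.headD ' ')
def bByFirst : PySem.Dict Char (List String) :=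
  adverseKeywords.foldl
    (fun d kw => d.insert (kw.toList.headD ' ') (d.getD (kw.toList.headD ' ') [] ++ [kw]))
    PySem.Dict.empty

-- 'for kw in _BY_FIRST.get(text[i], ()): if text.startswith(kw, i): return True'
-- (text.startswith(kw, i) is exactly: kw.toList is a prefix of the i-th suffix)
def bKwAt (suffix : List Char) : List String → Bool
  | [] => false
  | kw :: ks => if PySem.Chars.startswith suffix kw.toList then true else bKwAt suffix ks

-- 'for i in range(len(text)): …' — the i-th iteration sees the suffix text[i:],
-- whose head is text[i]; ported as structural recursion over the suffixes.
def bScan : List Char → Bool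
  | [] => false
  | c :: rest =>
    if bKwAt (c :: rest) (bByFirst.getD c []) then true else bScan rest

def bEventLoop : List (List (String × String)) → Bool
  | [] => false
  | e :: es =>
    let text := PySem.Str.lower (PySem.Dict.getD (PySem.Dict.mk e) "event" "")
    if bScan text.toList then true else bEventLoop es

def has_adverse_action_py_alt (complaint_data : List (String × List (List (String × String)))) : Bool :=
  bEventLoop (PySem.Dict.getD (PySem.Dict.mk complaint_data) "timeline" [])

-- ===== PRECONDITION & SPEC =====
def Spec_has_adverse_action_py (complaint_data : List (String × List (List (String × String)))) (out : Bool) : Prop := out = has_adverse_action_py_alt complaint_data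
instance (complaint_data : List (String × List (List (String × String)))) (out : Bool) : Decidable (Spec_has_adverse_action_py complaint_data out) := by unfold Spec_has_adverse_action_py; infer_instance

-- ===== CLAIM =====
def Claim_equal_has_adverse_action_py : Prop := ∀ (complaint_data : List (String × List (List (String × String)))), Dom_has_adverse_action_py complaint_data → Spec_has_adverse_action_py complaint_data (has_adverse_action_py complaint_data)

-- ===== LEMMAS AND PROOFS =====

lemma keywords_ne_nil : ∀ kw ∈ adverseKeywords, kw.toList ≠ [] := by decide

lemma bByFirst_getD (c : Char) :
    bByFirst.getD c [] = adverseKeywords.filter (fun kw => kw.toList.headD ' ' == c) := by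
  have h : bByFirst = (adverseKeywords.map (fun kw => (kw.toList.headD ' ', kw))).foldl
      (fun d p => d.modify p.1 [] (· ++ [p.2])) PySem.Dict.empty := by
    rw [List.foldl_map]; rfl
  rw [h, PySem.Dict.getD_foldl_modify_append, List.filter_map, List.map_map]
  simp [Function.comp_def]

lemma aKwLoop_eq_any (t : String) (ks : List String) :
    aKwLoop t ks = ks.any (fun k => PySem.Str.isIn k t) := by
  induction ks with
  | nil => rfl
  | cons k ks ih =>
    simp only [aKwLoop, List.any_cons, ih]
    cases PySem.Str.isIn k t <;> simp

lemma bKwAt_eq_any (s : List Char) (ks : List String) :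
    bKwAt s ks = ks.any (fun kw => PySem.Chars.startswith s kw.toList) := by
  induction ks with
  | nil => rfl
  | cons k ks ih =>
    simp only [bKwAt, List.any_cons, ih]
    cases PySem.Chars.startswith s k.toList <;> simp

-- the position scan finds exactly "some keyword occurs as a substring"
lemma bScan_iff (l : List Char) :
    bScan l = true ↔ ∃ kw ∈ adverseKeywords, PySem.Chars.isIn kw.toList l = true := by
  induction l with
  | nil =>
    simp only [bScan]
    constructor
    · intro h; exact absurd h (by decide)
    · rintro ⟨kw, hkw, h⟩
      rw [PySem.Chars.isIn_iff_infix, List.infix_nil] at h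
      exact absurd h (keywords_ne_nil kw hkw)
  | cons c rest ih =>
    simp only [bScan]
    by_cases hh : bKwAt (c :: rest) (bByFirst.getD c []) = true
    · simp only [hh, if_true, true_iff]
      rw [bKwAt_eq_any, List.any_eq_true] at hh
      obtain ⟨kw, hkwmem, hsw⟩ := hh
      rw [bByFirst_getD, List.mem_filter] at hkwmem
      refine ⟨kw, hkwmem.1, ?_⟩
      rw [PySem.Chars.isIn_iff_infix]
      exact (PySem.Chars.startswith_iff _ _ |>.mp hsw).isInfix
    · rw [if_neg hh, ih]
      constructor
      · rintro ⟨kw, hkw, h⟩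
        refine ⟨kw, hkw, ?_⟩
        rw [PySem.Chars.isIn_iff_infix] at h ⊢
        exact h.trans (List.suffix_cons c rest).isInfix
      · rintro ⟨kw, hkw, h⟩
        rw [PySem.Chars.isIn_iff_infix, List.infix_cons_iff] at h
        rcases h with hpre | hinf
        · exfalso; apply hh
          rw [bKwAt_eq_any, List.any_eq_true]
          refine ⟨kw, ?_, (PySem.Chars.startswith_iff _ _).mpr hpre⟩
          rw [bByFirst_getD, List.mem_filter]
          refine ⟨hkw, ?_⟩
          obtain ⟨t, ht⟩ := hpre
          cases hkl : kw.toList with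
          | nil => exact absurd hkl (keywords_ne_nil kw hkw)
          | cons x xs =>
            rw [hkl] at ht
            simp only [List.cons_append] at ht
            injection ht with h1 _
            simp [h1]
        · exact ⟨kw, hkw, (PySem.Chars.isIn_iff_infix _ _).mpr hinf⟩

lemma perEvent_eq (t : String) :
    aKwLoop t adverseKeywords = bScan t.toList := by
  apply Bool.eq_iff_iff.mpr
  rw [bScan_iff, aKwLoop_eq_any, List.any_eq_true]
  constructor
  · rintro ⟨kw, hkw, h⟩
    exact ⟨kw, hkw, by rwa [PySem.Str.isIn_eq] at h⟩
  · rintro ⟨kw, hkw, h⟩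
    exact ⟨kw, hkw, by rwa [PySem.Str.isIn_eq]⟩

lemma eventLoops_eq (es : List (List (String × String))) :
    aEventLoop es = bEventLoop es := by
  induction es with
  | nil => rfl
  | cons e es ih =>
    simp only [aEventLoop, bEventLoop, perEvent_eq, ih]

-- ===== VERDICT =====
theorem has_adverse_action_py_spec : Claim_equal_has_adverse_action_py := by
  intro cd _
  unfold Spec_has_adverse_action_py has_adverse_action_py has_adverse_action_py_alt
  rw [eventLoops_eq]
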